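-- pv_equiv track=rewrite | github.com/alexandre-clement/zerkel-public | src/zerkel/core/set.py | _build_number_of_rooted_identity_trees_of_height_n
-- ===== SOURCE A (Python) =====
-- def _build_number_of_rooted_identity_trees_of_height_n(n):
--     result = [1]
--     total = 1
--     for i in range(n):
--         temp = 2 ** total - total
--         result.append(temp)
--         total += temp
--     return result
-- ===== SOURCE B (Python) =====
-- def _build_number_of_rooted_identity_trees_of_height_n(n):
--     # Two passes: build the table of running totals t[k] (t[0] = 1, t[k+1] = 2**t[k],
--     # since A's accumulator satisfies total + temp = 2**total), then take the
--     # first entry followed by the consecutive differences.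
--     t = [1]
--     for _ in range(n):
--         t.append(2 ** t[-1])
--     return [t[0]] + [b - a for a, b in zip(t, t[1:])]
-- ===== Notes on version B (the rewrite author's own statement) =====
-- stated objective: alternative
-- what changed: Replaces A's single interleaved accumulate-and-append loop with a two-pass shape: first build the table of running totals t[0]=1, t[k+1]=2**t[k] (using that A's accumulator satisfies total+temp=2**total), then emit t[0] followed by the consecutive differences of the table.
import Mathlib
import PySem

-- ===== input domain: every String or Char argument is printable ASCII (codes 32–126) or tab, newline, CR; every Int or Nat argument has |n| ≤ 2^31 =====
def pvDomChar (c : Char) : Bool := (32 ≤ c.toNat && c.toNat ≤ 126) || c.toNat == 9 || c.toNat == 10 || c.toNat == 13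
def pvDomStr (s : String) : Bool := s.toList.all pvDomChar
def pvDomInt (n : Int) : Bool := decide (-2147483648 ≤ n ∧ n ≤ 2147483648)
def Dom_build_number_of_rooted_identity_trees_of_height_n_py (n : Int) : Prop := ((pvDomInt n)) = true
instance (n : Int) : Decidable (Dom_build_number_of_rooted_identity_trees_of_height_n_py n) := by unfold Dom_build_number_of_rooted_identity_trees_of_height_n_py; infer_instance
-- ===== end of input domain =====

-- B replaces A's interleaved accumulate-and-append loop with two passes: build the
-- table of running totals (t[0]=1, t[k+1]=2**t[k]), then take consecutive differences.
-- Objective: alternative decomposition; same asymptotic cost.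

-- ===== PORT A =====
-- for i in range(n): runs n.toNat times (empty for n ≤ 0); the unused index i is dropped.
-- 2 ** total is ported as 2 ^ total.toNat; exact since total ≥ 1 throughout.
def build_number_of_rooted_identity_trees_of_height_n_py (n : Int) : List Int :=
  let s := (List.range n.toNat).foldl
    (fun (st : List Int × Int) _ =>
      let temp : Int := 2 ^ st.2.toNat - st.2
      (st.1 ++ [temp], st.2 + temp))
    ([1], 1)
  s.1

-- ===== PORT B =====
-- t[-1] on the always-nonempty table; default is never reached.
def pvLastB : List Int → Int
  | [] => 1
  | [a] => a
  | _ :: b :: rest => pvLastB (b :: rest)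

-- the table t: t = [1]; for _ in range(n): t.append(2 ** t[-1])
-- (2 ** x ported as 2 ^ x.toNat; exact since every table entry is ≥ 1)
def pvTableB : Nat → List Int
  | 0 => [1]
  | k+1 => pvTableB k ++ [2 ^ (pvLastB (pvTableB k)).toNat]

-- [b - a for a, b in zip(t, t[1:])]
def pvDiffsB : List Int → List Int
  | a :: b :: rest => (b - a) :: pvDiffsB (b :: rest)
  | _ => []

def build_number_of_rooted_identity_trees_of_height_n_py_alt (n : Int) : List Int :=
  let t := pvTableB n.toNat
  match t with
  | [] => []           -- unreachable: the table always starts with [1]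
  | h :: _ => h :: pvDiffsB t

-- ===== PRECONDITION & SPEC =====
def Spec_build_number_of_rooted_identity_trees_of_height_n_py (n : Int) (out : List Int) : Prop := out = build_number_of_rooted_identity_trees_of_height_n_py_alt n
instance (n : Int) (out : List Int) : Decidable (Spec_build_number_of_rooted_identity_trees_of_height_n_py n out) := by unfold Spec_build_number_of_rooted_identity_trees_of_height_n_py; infer_instance

-- ===== CLAIM (what is proved, stated in full; the proofs are below) =====
def Claim_equal_build_number_of_rooted_identity_trees_of_height_n_py : Prop := ∀ (n : Int), Dom_build_number_of_rooted_identity_trees_of_height_n_py n → Spec_build_number_of_rooted_identity_trees_of_height_n_py n (build_number_of_rooted_identity_trees_of_height_n_py n)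

-- ===== LEMMAS AND PROOFS =====

-- the sequence of running totals: tot 0 = 1, tot (k+1) = 2^(tot k)
def pvTot : Nat → Int
  | 0 => 1
  | k+1 => 2 ^ (pvTot k).toNat

-- the common value of both programs
def pvOut (k : Nat) : List Int := 1 :: (List.range k).map (fun j => pvTot (j+1) - pvTot j)

theorem pvOut_succ (k : Nat) : pvOut (k+1) = pvOut k ++ [pvTot (k+1) - pvTot k] := by
  simp [pvOut, List.range_succ]

theorem pvLastB_append_single (xs : List Int) (y : Int) : pvLastB (xs ++ [y]) = y := by
  induction xs with
  | nil => rfl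
  | cons a t ih => cases t with
    | nil => rfl
    | cons b r => simpa [pvLastB] using ih

theorem pvTableB_ne_nil_last (k : Nat) : pvTableB k ≠ [] ∧ pvLastB (pvTableB k) = pvTot k := by
  induction k with
  | zero => exact ⟨by simp [pvTableB], rfl⟩
  | succ k ih =>
    refine ⟨by simp [pvTableB], ?_⟩
    simp [pvTableB, pvLastB_append_single, ih.2, pvTot]

theorem pvDiffsB_append : ∀ (xs : List Int), xs ≠ [] → ∀ (y : Int),
    pvDiffsB (xs ++ [y]) = pvDiffsB xs ++ [y - pvLastB xs]
  | [a], _, y => rfl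
  | a :: b :: r, _, y => by
    have ih := pvDiffsB_append (b :: r) (by simp) y
    simp only [pvDiffsB, pvLastB, List.cons_append]
    exact congrArg (List.cons (b - a)) ih

theorem pvDiffsB_table (k : Nat) :
    pvDiffsB (pvTableB k) = (List.range k).map (fun j => pvTot (j+1) - pvTot j) := by
  induction k with
  | zero => rfl
  | succ k ih =>
    have h := pvTableB_ne_nil_last k
    simp [pvTableB, pvDiffsB_append _ h.1 _, ih, h.2, List.range_succ, pvTot]

theorem pvTableB_head (k : Nat) : ∃ r, pvTableB k = 1 :: r := by
  induction k with
  | zero => exact ⟨[], rfl⟩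
  | succ k ih =>
    obtain ⟨r, hr⟩ := ih
    exact ⟨r ++ [2 ^ (pvLastB (pvTableB k)).toNat], by simp [pvTableB, hr]⟩

theorem pvAlt_eq (n : Int) : build_number_of_rooted_identity_trees_of_height_n_py_alt n = pvOut n.toNat := by
  obtain ⟨r, hr⟩ := pvTableB_head n.toNat
  simp only [build_number_of_rooted_identity_trees_of_height_n_py_alt]
  rw [hr]
  show 1 :: pvDiffsB ((1 : Int) :: r) = pvOut n.toNat
  rw [← hr, pvDiffsB_table]
  rfl

theorem pvA_foldl (k : Nat) :
    (List.range k).foldl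
      (fun (st : List Int × Int) _ =>
        let temp : Int := 2 ^ st.2.toNat - st.2
        (st.1 ++ [temp], st.2 + temp))
      ([1], 1) = (pvOut k, pvTot k) := by
  induction k with
  | zero => rfl
  | succ k ih =>
    rw [List.range_succ, List.foldl_append, ih]
    have h2 : pvTot k + (2 ^ (pvTot k).toNat - pvTot k) = pvTot (k+1) := by
      simp [pvTot]
    simp only [List.foldl_cons, List.foldl_nil, pvOut_succ]
    refine Prod.ext ?_ ?_
    · show pvOut k ++ [2 ^ (pvTot k).toNat - pvTot k] = pvOut k ++ [pvTot (k+1) - pvTot k]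
      simp [pvTot]
    · exact h2

-- ===== VERDICT (by name: the statement is the Claim_ definition above) =====
theorem build_number_of_rooted_identity_trees_of_height_n_py_spec : Claim_equal_build_number_of_rooted_identity_trees_of_height_n_py := by
  intro n _
  show build_number_of_rooted_identity_trees_of_height_n_py n = _
  rw [pvAlt_eq]
  simp only [build_number_of_rooted_identity_trees_of_height_n_py, pvA_foldl]
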